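-- pv_equiv track=rewrite | github.com/pc5401/my_BOJ | 백준/Silver/17357. 자동차가 차주 김표준의 편을 들면？/자동차가 차주 김표준의 편을 들면？.py | solve
-- ===== SOURCE A (Python) =====
-- def solve(N: int, A: list[int]):
--     rtn = []
--     S = [0] * (N + 1)
--     S2 = [0] * (N + 1)
--     for i in range(1, N + 1):
--         S[i] = S[i-1] + A[i-1]
--         S2[i] = S2[i-1] + A[i-1] * A[i-1]
--
--
--     for k in range(1, N + 1):
--         max_var_num = None
--         best_i = 1
--
--         for i in range(1, N - k + 2):
--             sum_ = S[i + k -1] - S[i -1]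
--             sum_sq = S2[i + k -1] - S2[i -1]
--
--             var_num = sum_sq * k - sum_ * sum_
--
--             if max_var_num is None or var_num > max_var_num:
--                 max_var_num = var_num
--                 best_i = i
--
--
--         rtn.append(best_i)
--     return rtn
-- ===== SOURCE B (Python) =====
-- def solve(N: int, A: list[int]):
--     # Sliding-window re-implementation: no prefix arrays; running sum / sum of
--     # squares are updated incrementally as the window of size k slides.
--     rtn = []
--     for k in range(1, N + 1):
--         sum_ = 0
--         sum_sq = 0
--         for j in range(k):
--             sum_ += A[j]
--             sum_sq += A[j] * A[j]
--         best_i = 1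
--         max_var_num = sum_sq * k - sum_ * sum_
--         for i in range(2, N - k + 2):
--             out = A[i - 2]
--             inn = A[i + k - 2]
--             sum_ += inn - out
--             sum_sq += inn * inn - out * out
--             var_num = sum_sq * k - sum_ * sum_
--             if var_num > max_var_num:
--                 max_var_num = var_num
--                 best_i = i
--         rtn.append(best_i)
--     return rtn
-- ===== Notes on version B (the rewrite author's own statement) =====
-- stated objective: alternative
-- what changed: Replaced the O(N) prefix-sum/prefix-square tables (and their per-window table lookups) with a sliding window per k that maintains the running sum and sum of squares incrementally, updating the best index on strict '>'.
import Mathlib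
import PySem

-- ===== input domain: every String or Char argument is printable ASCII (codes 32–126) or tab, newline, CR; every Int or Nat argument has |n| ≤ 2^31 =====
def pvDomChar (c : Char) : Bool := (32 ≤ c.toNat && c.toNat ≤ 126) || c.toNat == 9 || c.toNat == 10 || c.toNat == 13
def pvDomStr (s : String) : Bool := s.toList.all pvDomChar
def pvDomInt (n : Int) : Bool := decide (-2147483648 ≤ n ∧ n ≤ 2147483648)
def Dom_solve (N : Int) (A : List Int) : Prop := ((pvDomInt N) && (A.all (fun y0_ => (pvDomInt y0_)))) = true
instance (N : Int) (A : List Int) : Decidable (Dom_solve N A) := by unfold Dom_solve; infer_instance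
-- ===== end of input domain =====

-- B replaces A's prefix-sum tables by a per-window-size sliding window with an incrementally
-- maintained running sum / sum of squares (objective: alternative decomposition, same O(N^2) cost).

-- ===== PORT A =====
-- one iteration of A's prefix-array-building loop (writes S[i] and S2[i])
def solveAStep (A : List Int) (st : List Int × List Int) (i : Int) : List Int × List Int :=
  let a := PySem.List.pyGetD A (i - 1) 0
  (PySem.List.pySetD st.1 i (PySem.List.pyGetD st.1 (i - 1) 0 + a),
   PySem.List.pySetD st.2 i (PySem.List.pyGetD st.2 (i - 1) 0 + a * a))

-- one iteration of A's inner loop over window starts i (state: max_var_num, best_i)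
def solveInnerA (S S2 : List Int) (k : Int) (st : Option Int × Int) (i : Int) :
    Option Int × Int :=
  let sum_ := PySem.List.pyGetD S (i + k - 1) 0 - PySem.List.pyGetD S (i - 1) 0
  let sum_sq := PySem.List.pyGetD S2 (i + k - 1) 0 - PySem.List.pyGetD S2 (i - 1) 0
  let var_num := sum_sq * k - sum_ * sum_
  match st.1 with
  | none => (some var_num, i)
  | some m => if var_num > m then (some var_num, i) else st

def solve (N : Int) (A : List Int) : List Int :=
  let SS := (PySem.List.pyRange 1 (N + 1) 1).foldl (solveAStep A)
      (List.replicate (N + 1).toNat 0, List.replicate (N + 1).toNat 0)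
  (PySem.List.pyRange 1 (N + 1) 1).foldl (fun rtn k =>
      rtn ++ [((PySem.List.pyRange 1 (N - k + 2) 1).foldl (solveInnerA SS.1 SS.2 k)
                (none, 1)).2]) []

-- ===== PORT B =====
-- B's initial-window loop (running sum and sum of squares over A[0..k-1])
def solveBInit (A : List Int) (st : Int × Int) (j : Int) : Int × Int :=
  let a := PySem.List.pyGetD A j 0
  (st.1 + a, st.2 + a * a)

-- B's sliding step (state: sum_, sum_sq, max_var_num, best_i)
def solveBSlide (A : List Int) (k : Int) (st : Int × Int × Int × Int) (i : Int) :
    Int × Int × Int × Int :=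
  let outv := PySem.List.pyGetD A (i - 2) 0
  let inv := PySem.List.pyGetD A (i + k - 2) 0
  let s := st.1 + inv - outv
  let sq := st.2.1 + inv * inv - outv * outv
  let v := sq * k - s * s
  if v > st.2.2.1 then (s, sq, v, i) else (s, sq, st.2.2.1, st.2.2.2)

def solve_alt (N : Int) (A : List Int) : List Int :=
  (PySem.List.pyRange 1 (N + 1) 1).foldl (fun rtn k =>
    let init := (PySem.List.pyRange 0 k 1).foldl (solveBInit A) (0, 0)
    let st := (PySem.List.pyRange 2 (N - k + 2) 1).foldl (solveBSlide A k)
        (init.1, init.2, init.2 * k - init.1 * init.1, 1)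
    rtn ++ [st.2.2.2]) []

-- ===== PRECONDITION & SPEC =====
-- Pre_ excludes exactly the inputs (N greater than len(A)) on which the Python A raises IndexError.
def Pre_solve (N : Int) (A : List Int) : Prop := N ≤ (A.length : Int)
instance (N : Int) (A : List Int) : Decidable (Pre_solve N A) := by
  unfold Pre_solve; infer_instance

def pvWitness_solve : Int × List Int := (3, [1, 2, 4])

def Spec_solve (N : Int) (A : List Int) (out : List Int) : Prop := out = solve_alt N A
instance (N : Int) (A : List Int) (out : List Int) : Decidable (Spec_solve N A out) := by
  unfold Spec_solve; infer_instance

-- ===== CLAIM (what is proved, stated in full; the proofs are below) =====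
def Claim_equal_solve : Prop :=
  ∀ (N : Int) (A : List Int), Dom_solve N A → Pre_solve N A → Spec_solve N A (solve N A)

-- ===== LEMMAS AND PROOFS =====

-- prefix sum of the first n entries of A, and of their squares
def pvP (A : List Int) (n : Nat) : Int := (A.take n).sum
def pvQ (A : List Int) (n : Nat) : Int := ((A.take n).map (fun x => x * x)).sum

-- the quantity both programs maximize, for window size k and start i
def pvV (A : List Int) (k i : Int) : Int :=
  (pvQ A (i + k - 1).toNat - pvQ A (i - 1).toNat) * k -
    (pvP A (i + k - 1).toNat - pvP A (i - 1).toNat) *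
      (pvP A (i + k - 1).toNat - pvP A (i - 1).toNat)

-- reference first-wins argmax step
def pvArg (f : Int → Int) (st : Int × Int) (i : Int) : Int × Int :=
  if f i > st.1 then (f i, i) else st

theorem pvP_succ (A : List Int) (n : Nat) (h : n < A.length) :
    pvP A (n + 1) = pvP A n + A.getD n 0 := by
  simp [pvP, List.getD_eq_getElem?_getD, List.getElem?_eq_getElem h, List.sum_take_succ A n h]

theorem pvQ_succ (A : List Int) (n : Nat) (h : n < A.length) :
    pvQ A (n + 1) = pvQ A n + A.getD n 0 * A.getD n 0 := by
  have h' : n < (A.map (fun x => x * x)).length := by simpa using h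
  simp [pvQ, List.map_take, List.getD_eq_getElem?_getD, List.getElem?_eq_getElem h,
    List.sum_take_succ (A.map (fun x => x * x)) n h']

-- A's prefix-building loop, characterized
theorem prefix_inv (A : List Int) (n : Nat) (hn : n ≤ A.length) :
    ∀ m, m ≤ n →
      (PySem.List.pyRange 1 ((m : Int) + 1) 1).foldl (solveAStep A)
        (List.replicate (n + 1) 0, List.replicate (n + 1) 0)
      = ((List.range (m + 1)).map (fun j => pvP A j) ++ List.replicate (n - m) 0,
         (List.range (m + 1)).map (fun j => pvQ A j) ++ List.replicate (n - m) 0) := by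
  intro m
  induction m with
  | zero =>
    intro _
    rw [PySem.List.pyRange_one_eq_nil (by norm_num)]
    simp [pvP, pvQ, List.replicate_succ]
  | succ m ih =>
    intro hm
    have hm' : m ≤ n := by omega
    have hrange : PySem.List.pyRange 1 ((↑(m + 1) : Int) + 1) 1
        = PySem.List.pyRange 1 ((m : Int) + 1) 1 ++ [(m : Int) + 1] := by
      push_cast
      rw [PySem.List.pyRange_one_succ_right (by omega)]
    rw [hrange, List.foldl_append, ih hm']
    have hmlen : m < A.length := by omega
    have e1 : (((m + 1 : Nat) : Int) - 1) = (m : Int) := by push_cast; ring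
    have e2 : ((m : Int) + 1) = ((m + 1 : Nat) : Int) := by push_cast; ring
    have hrep : n - m = (n - (m + 1)) + 1 := by omega
    simp only [List.foldl_cons, List.foldl_nil, solveAStep, e1, e2,
      PySem.List.pyGetD_natCast, PySem.List.pySetD_natCast]
    have hgm : ∀ f : Nat → Int,
        (((List.range (m + 1)).map f) ++ List.replicate (n - m) 0).getD m 0 = f m := by
      intro f
      rw [List.getD_append _ _ _ _ (by simp)]
      simp [List.getD_eq_getElem?_getD]
    have hset : ∀ (f : Nat → Int) (v : Int),
        (((List.range (m + 1)).map f) ++ List.replicate (n - m) 0).set (m + 1) v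
        = ((List.range (m + 1)).map f) ++ (v :: List.replicate (n - (m + 1)) 0) := by
      intro f v
      rw [hrep, List.replicate_succ]
      have : m + 1 = ((List.range (m + 1)).map f).length := by simp
      rw [this]
      simp
    simp only [hgm, hset]
    rw [← pvP_succ A m hmlen, ← pvQ_succ A m hmlen]
    simp [List.range_succ]

-- lookups in the finished prefix arrays
theorem prefix_get (A : List Int) (n : Nat) (hn : n ≤ A.length) (i : Int)
    (h0 : 0 ≤ i) (h1 : i ≤ (n : Int)) :
    PySem.List.pyGetD ((PySem.List.pyRange 1 ((n : Int) + 1) 1).foldl (solveAStep A)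
        (List.replicate (n + 1) 0, List.replicate (n + 1) 0)).1 i 0 = pvP A i.toNat ∧
    PySem.List.pyGetD ((PySem.List.pyRange 1 ((n : Int) + 1) 1).foldl (solveAStep A)
        (List.replicate (n + 1) 0, List.replicate (n + 1) 0)).2 i 0 = pvQ A i.toNat := by
  rw [prefix_inv A n hn n le_rfl]
  have e : i = ((i.toNat : Nat) : Int) := by omega
  have hi : i.toNat < n + 1 := by omega
  constructor <;>
    · rw [e, PySem.List.pyGetD_natCast]
      simp [List.getD_eq_getElem?_getD, List.getElem?_range hi]
      rw [max_eq_left h0]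

-- A's inner loop equals the reference argmax once the state is 'some'
theorem innerA_lift (f : Int → Int) (l : List Int) (mv b : Int) :
    l.foldl (fun (st : Option Int × Int) i =>
        match st.1 with
        | none => (some (f i), i)
        | some m => if f i > m then (some (f i), i) else st) (some mv, b)
      = (some (l.foldl (pvArg f) (mv, b)).1, (l.foldl (pvArg f) (mv, b)).2) := by
  induction l generalizing mv b with
  | nil => simp
  | cons x l ih =>
    simp only [List.foldl_cons, pvArg]
    split_ifs <;> simp [ih]

-- B's initial-window loop, characterized
theorem initB_inv (A : List Int) : ∀ m : Nat, m ≤ A.length →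
    (PySem.List.pyRange 0 (m : Int) 1).foldl (solveBInit A) (0, 0) = (pvP A m, pvQ A m) := by
  intro m
  induction m with
  | zero => intro _; simp [PySem.List.pyRange_one_eq_nil, pvP, pvQ]
  | succ m ih =>
    intro hm
    have : PySem.List.pyRange 0 ((m + 1 : Nat) : Int) 1
        = PySem.List.pyRange 0 (m : Int) 1 ++ [(m : Int)] := by
      push_cast
      rw [PySem.List.pyRange_one_succ_right (by omega)]
    rw [this, List.foldl_append, ih (by omega)]
    simp only [solveBInit, List.foldl_cons, List.foldl_nil, PySem.List.pyGetD_natCast]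
    rw [← pvP_succ A m (by omega), ← pvQ_succ A m (by omega)]

-- B's sliding loop, characterized
theorem slideB_inv (A : List Int) (N k : Int) (hk : 1 ≤ k)
    (hlen : N ≤ (A.length : Int)) :
    ∀ c : Nat, (c : Int) + k ≤ N → ∀ mv b,
      (PySem.List.pyRange 2 (2 + (c : Int)) 1).foldl (solveBSlide A k)
          (pvP A k.toNat, pvQ A k.toNat, mv, b)
        = (pvP A (c + k.toNat) - pvP A c, pvQ A (c + k.toNat) - pvQ A c,
           (PySem.List.pyRange 2 (2 + (c : Int)) 1).foldl (pvArg (pvV A k)) (mv, b)) := by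
  intro c
  induction c with
  | zero =>
    intro _ mv b
    rw [PySem.List.pyRange_one_eq_nil (by omega)]
    simp [pvP, pvQ]
  | succ c ih =>
    intro hc mv b
    have hsplit : PySem.List.pyRange 2 (2 + ((c + 1 : Nat) : Int)) 1
        = PySem.List.pyRange 2 (2 + (c : Int)) 1 ++ [2 + (c : Int)] := by
      push_cast
      rw [show (2 : Int) + ((c : Int) + 1) = (2 + (c : Int)) + 1 by ring,
        PySem.List.pyRange_one_succ_right (by omega)]
    rw [hsplit, List.foldl_append, List.foldl_append, ih (by omega) mv b]
    have hclen : c < A.length := by omega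
    have hcklen : c + k.toNat < A.length := by omega
    have e1 : (2 + (c : Int) - 2) = ((c : Nat) : Int) := by ring
    have e2 : (2 + (c : Int) + k - 2) = ((c + k.toNat : Nat) : Int) := by push_cast; omega
    have i1 : (2 + (c : Int) + k - 1).toNat = c + 1 + k.toNat := by omega
    have i2 : (2 + (c : Int) - 1).toNat = c + 1 := by omega
    have hv : pvV A k (2 + (c : Int))
        = (pvQ A (c + 1 + k.toNat) - pvQ A (c + 1)) * k -
          (pvP A (c + 1 + k.toNat) - pvP A (c + 1)) *
            (pvP A (c + 1 + k.toNat) - pvP A (c + 1)) := by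
      rw [pvV, i1, i2]
    simp only [solveBSlide, pvArg, List.foldl_cons, List.foldl_nil, e1, e2,
      PySem.List.pyGetD_natCast, hv]
    rw [show pvP A (c + k.toNat) - pvP A c + A.getD (c + k.toNat) 0 - A.getD c 0
        = pvP A (c + 1 + k.toNat) - pvP A (c + 1) from by
      rw [show c + 1 + k.toNat = (c + k.toNat) + 1 from by ring,
        pvP_succ A (c + k.toNat) hcklen, pvP_succ A c hclen]
      ring]
    rw [show pvQ A (c + k.toNat) - pvQ A c
          + A.getD (c + k.toNat) 0 * A.getD (c + k.toNat) 0 - A.getD c 0 * A.getD c 0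
        = pvQ A (c + 1 + k.toNat) - pvQ A (c + 1) from by
      rw [show c + 1 + k.toNat = (c + k.toNat) + 1 from by ring,
        pvQ_succ A (c + k.toNat) hcklen, pvQ_succ A c hclen]
      ring]
    split_ifs <;> simp

-- for each window size k, A's table-lookup scan and B's sliding scan pick the same index
theorem perk (A : List Int) (n : Nat) (hn : n ≤ A.length) (k : Int)
    (hk1 : 1 ≤ k) (hkn : k ≤ (n : Int)) :
    ((PySem.List.pyRange 1 ((n : Int) - k + 2) 1).foldl
        (solveInnerA
          ((PySem.List.pyRange 1 ((n : Int) + 1) 1).foldl (solveAStep A)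
            (List.replicate (n + 1) 0, List.replicate (n + 1) 0)).1
          ((PySem.List.pyRange 1 ((n : Int) + 1) 1).foldl (solveAStep A)
            (List.replicate (n + 1) 0, List.replicate (n + 1) 0)).2 k)
        ((none : Option Int), (1 : Int))).2
    = (let init := (PySem.List.pyRange 0 k 1).foldl (solveBInit A) (0, 0)
       let st := (PySem.List.pyRange 2 ((n : Int) - k + 2) 1).foldl (solveBSlide A k)
          (init.1, init.2, init.2 * k - init.1 * init.1, 1)
       st.2.2.2) := by
  have hcongr : ((PySem.List.pyRange 1 ((n : Int) - k + 2) 1).foldl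
        (solveInnerA
          ((PySem.List.pyRange 1 ((n : Int) + 1) 1).foldl (solveAStep A)
            (List.replicate (n + 1) 0, List.replicate (n + 1) 0)).1
          ((PySem.List.pyRange 1 ((n : Int) + 1) 1).foldl (solveAStep A)
            (List.replicate (n + 1) 0, List.replicate (n + 1) 0)).2 k)
        ((none : Option Int), (1 : Int)))
      = ((PySem.List.pyRange 1 ((n : Int) - k + 2) 1).foldl
          (fun (st : Option Int × Int) i =>
            match st.1 with
            | none => (some (pvV A k i), i)
            | some m => if pvV A k i > m then (some (pvV A k i), i) else st)
          ((none : Option Int), (1 : Int))) := by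
    apply PySem.List.foldl_congr_mem
    intro st i hi
    rw [PySem.List.mem_pyRange_one] at hi
    have g1 := prefix_get A n hn (i + k - 1) (by omega) (by omega)
    have g2 := prefix_get A n hn (i - 1) (by omega) (by omega)
    simp only [solveInnerA, g1.1, g1.2, g2.1, g2.2, pvV]
  rw [hcongr]
  rw [PySem.List.pyRange_one_cons (by omega), List.foldl_cons,
    show (1 : Int) + 1 = 2 from rfl]
  rw [innerA_lift (pvV A k) (PySem.List.pyRange 2 ((n : Int) - k + 2) 1) (pvV A k 1) 1]
  have hkNat : k = ((k.toNat : Nat) : Int) := by omega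
  have hinit : (PySem.List.pyRange 0 k 1).foldl (solveBInit A) (0, 0)
      = (pvP A k.toNat, pvQ A k.toNat) := by
    rw [hkNat]; exact initB_inv A k.toNat (by omega)
  have hbound : ((n : Int) - k + 2) = 2 + ((n - k.toNat : Nat) : Int) := by omega
  have hc : ((n - k.toNat : Nat) : Int) + k ≤ (n : Int) := by omega
  have hslide := slideB_inv A (n : Int) k hk1 (by exact_mod_cast hn) (n - k.toNat)
      hc (pvQ A k.toNat * k - pvP A k.toNat * pvP A k.toNat) 1
  have hv1 : pvV A k 1 = pvQ A k.toNat * k - pvP A k.toNat * pvP A k.toNat := by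
    have t1 : ((1 : Int) + k - 1).toNat = k.toNat := by omega
    have t2 : ((1 : Int) - 1).toNat = 0 := by omega
    rw [pvV, t1, t2]
    simp [pvP, pvQ]
  simp only [hinit, hbound]
  rw [hslide]
  rw [hv1]

-- ===== VERDICT (by name: the statement is the Claim_ definition above) =====
theorem solve_spec : Claim_equal_solve := by
  intro N A _ hpre
  unfold Spec_solve
  by_cases hN : N ≤ 0
  · simp [solve, solve_alt, PySem.List.pyRange_one_eq_nil (by omega : N + 1 ≤ 1)]
  · obtain ⟨n, rfl⟩ : ∃ n : Nat, N = (n : Int) := ⟨N.toNat, by omega⟩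
    have hn : n ≤ A.length := by unfold Pre_solve at hpre; exact_mod_cast hpre
    simp only [solve, solve_alt]
    rw [show ((n : Int) + 1).toNat = n + 1 from by omega]
    apply PySem.List.foldl_congr_mem
    intro acc k hk
    rw [PySem.List.mem_pyRange_one] at hk
    rw [perk A n hn k hk.1 (by omega)]
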